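-- pv_equiv track=rewrite | github.com/sqlmapproject/sqlmap | tamper/charunicodeescape.py | tamper
-- ===== SOURCE A (Python) =====
-- import string
--
-- def tamper(payload, **kwargs):
--     """
--     Unicode-escapes non-encoded characters in a given payload (not
--     processing already encoded)
--
--     Notes:
--         * Useful to bypass weak filtering and/or WAFs in JSON contexes
--
--     >>> tamper('SELECT FIELD FROM TABLE')
--     '\\\\u0053\\\\u0045\\\\u004C\\\\u0045\\\\u0043\\\\u0054\\\\u0020\\\\u0046\\\\u0049\\\\u0045\\\\u004C\\\\u0044\\\\u0020\\\\u0046\\\\u0052\\\\u004F\\\\u004D\\\\u0020\\\\u0054\\\\u0041\\\\u0042\\\\u004C\\\\u0045'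
--     """
--
--     retVal = payload
--
--     if payload:
--         retVal = ""
--         i = 0
--
--         while i < len(payload):
--             if payload[i] == '%' and (i < len(payload) - 2) and payload[i + 1:i + 2] in string.hexdigits and payload[i + 2:i + 3] in string.hexdigits:
--                 retVal += "\\u00%s" % payload[i + 1:i + 3]
--                 i += 3
--             else:
--                 retVal += '\\u%.4X' % ord(payload[i])
--                 i += 1
--
--     return retVal
-- ===== SOURCE B (Python) =====
-- import re
--
-- _PAT = re.compile(r'%[0-9a-fA-F]{2}|.', re.DOTALL)
--
-- def tamper(payload, **kwargs):
--     if payload: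
--         payload = _PAT.sub(
--             lambda m: "\\u00" + m.group(0)[1:] if len(m.group(0)) == 3
--             else "\\u%.4X" % ord(m.group(0)),
--             payload)
--     return payload
-- ===== Notes on version B (the rewrite author's own statement) =====
-- stated objective: faster
-- what changed: Replaced A's manual while-loop index state machine (slice lookahead, quadratic retVal += string accumulation) by a single regex pass re.sub(r'%[0-9a-fA-F]{2}|.', repl, payload) with re.DOTALL, whose replacement function maps each matched token to its escape.
import Mathlib
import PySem

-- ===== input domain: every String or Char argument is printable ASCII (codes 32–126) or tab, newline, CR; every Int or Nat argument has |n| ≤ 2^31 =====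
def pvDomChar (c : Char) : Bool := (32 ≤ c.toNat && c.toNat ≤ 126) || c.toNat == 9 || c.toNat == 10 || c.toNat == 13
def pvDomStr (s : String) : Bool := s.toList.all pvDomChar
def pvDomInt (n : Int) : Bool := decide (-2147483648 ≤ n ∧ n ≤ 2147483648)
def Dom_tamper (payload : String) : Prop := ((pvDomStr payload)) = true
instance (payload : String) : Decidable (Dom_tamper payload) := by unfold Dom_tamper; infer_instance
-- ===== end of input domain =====

-- B replaces A's index-based while-loop state machine with a single regex-style tokenize
-- pass (prefer a %hh match, else one char) mapped through a replacement function; the timing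
-- run measured B faster (A accumulates retVal by repeated string concatenation).


-- ===== PORT A =====
-- string.hexdigits
def pvHexdigits : List Char := "0123456789abcdefABCDEF".toList

-- '%X' for one hex digit (uppercase, as Python's %X)
def pvHexDigitU (n : Nat) : Char :=
  if n < 10 then Char.ofNat ('0'.toNat + n) else Char.ofNat ('A'.toNat + (n - 10))

-- '%.4X' % n — exact for n < 0x10000, which covers every character of Dom_tamper
def pvHex4 (n : Nat) : List Char :=
  [pvHexDigitU (n / 4096 % 16), pvHexDigitU (n / 256 % 16),
   pvHexDigitU (n / 16 % 16), pvHexDigitU (n % 16)]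

-- the while-loop of A: state (i, retVal)
def tamperLoop (cs : List Char) (i : Nat) (retVal : List Char) : List Char :=
  if _h : i < cs.length then
    if cs[i]? = some '%' ∧ i < cs.length - 2 ∧
       PySem.Chars.isIn (PySem.List.slice cs (some ((i : Int) + 1)) (some ((i : Int) + 2))) pvHexdigits ∧
       PySem.Chars.isIn (PySem.List.slice cs (some ((i : Int) + 2)) (some ((i : Int) + 3))) pvHexdigits then
      tamperLoop cs (i + 3)
        (retVal ++ ('\\' :: 'u' :: '0' :: '0' ::
          PySem.List.slice cs (some ((i : Int) + 1)) (some ((i : Int) + 3))))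
    else
      tamperLoop cs (i + 1)
        (retVal ++ ('\\' :: 'u' :: pvHex4 ((cs.getD i ' ').toNat)))
  else retVal
termination_by cs.length - i
decreasing_by all_goals omega

def tamper (payload : String) : String :=
  if payload = "" then payload
  else String.ofList (tamperLoop payload.toList 0 [])

-- ===== PORT B =====
-- the regex r'%[0-9a-fA-F]{2}|.' (DOTALL): the list of matched tokens, alternation order kept
def pvTokens : List Char → List (List Char)
  | '%' :: a :: b :: rest =>
      if a ∈ pvHexdigits ∧ b ∈ pvHexdigits then ['%', a, b] :: pvTokens rest
      else ['%'] :: pvTokens (a :: b :: rest)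
  | c :: rest => [c] :: pvTokens rest
  | [] => []

-- the replacement function of re.sub
def pvRepl (t : List Char) : List Char :=
  if t.length = 3 then '\\' :: 'u' :: '0' :: '0' :: t.drop 1
  else match t with
    | [c] => '\\' :: 'u' :: pvHex4 c.toNat
    | _ => []

def tamper_alt (payload : String) : String :=
  if payload = "" then payload
  else String.ofList (((pvTokens payload.toList).map pvRepl).flatten)

-- ===== PRECONDITION & SPEC =====
def Spec_tamper (payload : String) (out : String) : Prop := out = tamper_alt payload
instance (payload : String) (out : String) : Decidable (Spec_tamper payload out) := by unfold Spec_tamper; infer_instance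

-- ===== CLAIM (what is proved, stated in full; the proofs are below) =====
def Claim_equal_tamper : Prop := ∀ (payload : String), Dom_tamper payload → Spec_tamper payload (tamper payload)

-- ===== LEMMAS AND PROOFS =====

lemma isIn_singleton_hex (c : Char) (l : List Char) :
    PySem.Chars.isIn [c] l = decide (c ∈ l) := by
  rw [Bool.eq_iff_iff]
  simp [PySem.Chars.isIn_iff_infix, List.singleton_infix_iff]

-- unfolding lemmas for the tokenizer (its match patterns overlap)
lemma pvTokens_percent (a b : Char) (rest : List Char) :
    pvTokens ('%' :: a :: b :: rest) =
      if a ∈ pvHexdigits ∧ b ∈ pvHexdigits then ['%', a, b] :: pvTokens rest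
      else ['%'] :: pvTokens (a :: b :: rest) := by
  rw [pvTokens]

lemma pvTokens_cons_ne (c : Char) (rest : List Char) (hc : c ≠ '%') :
    pvTokens (c :: rest) = [c] :: pvTokens rest := by
  match rest with
  | [] => rw [pvTokens]; intro a b t h; exact absurd h hc
  | [x] => rw [pvTokens]; intro a b t h; exact absurd h hc
  | a :: b :: t => rw [pvTokens]; intro a' b' t' h; exact absurd h hc

lemma pvTokens_percent_short (rest : List Char) (hr : rest.length ≤ 1) :
    pvTokens ('%' :: rest) = ['%'] :: pvTokens rest := by
  match rest, hr with
  | [], _ => rw [pvTokens]; intro a b t _ h; exact absurd h (by simp)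
  | [x], _ => rw [pvTokens]; intro a b t _ h; exact absurd h (by simp)

lemma tamperLoop_eq (cs : List Char) (n i : Nat) (acc : List Char)
    (hn : cs.length - i ≤ n) :
    tamperLoop cs i acc = acc ++ ((pvTokens (cs.drop i)).map pvRepl).flatten := by
  induction n generalizing i acc with
  | zero =>
      have hle : cs.length ≤ i := by omega
      rw [tamperLoop, dif_neg (by omega), List.drop_eq_nil_of_le hle]
      simp [pvTokens]
  | succ m ih =>
      by_cases h : i < cs.length
      · -- one step of the loop
        have hdrop : cs.drop i = cs[i] :: cs.drop (i + 1) := List.drop_eq_getElem_cons h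
        have hget : cs[i]? = some cs[i] := List.getElem?_eq_getElem h
        have hgetD : cs.getD i ' ' = cs[i] := by simp [List.getD, hget]
        have hs1 : PySem.List.slice cs (some ((i : Int) + 1)) (some ((i : Int) + 2)) =
            (cs.drop (i + 1)).take 1 := by
          rw [show ((i : Int) + 1) = ((i + 1 : Nat) : Int) by push_cast; ring,
              show ((i : Int) + 2) = ((i + 2 : Nat) : Int) by push_cast; ring,
              PySem.List.slice_natCast]
          congr 1; omega
        have hs2 : PySem.List.slice cs (some ((i : Int) + 2)) (some ((i : Int) + 3)) =
            (cs.drop (i + 2)).take 1 := by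
          rw [show ((i : Int) + 2) = ((i + 2 : Nat) : Int) by push_cast; ring,
              show ((i : Int) + 3) = ((i + 3 : Nat) : Int) by push_cast; ring,
              PySem.List.slice_natCast]
          congr 1; omega
        have hs13 : PySem.List.slice cs (some ((i : Int) + 1)) (some ((i : Int) + 3)) =
            (cs.drop (i + 1)).take 2 := by
          rw [show ((i : Int) + 1) = ((i + 1 : Nat) : Int) by push_cast; ring,
              show ((i : Int) + 3) = ((i + 3 : Nat) : Int) by push_cast; ring,
              PySem.List.slice_natCast]
          congr 1; omega
        rw [tamperLoop, dif_pos h]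
        by_cases hc : cs[i]? = some '%' ∧ i < cs.length - 2 ∧
            PySem.Chars.isIn (PySem.List.slice cs (some ((i : Int) + 1)) (some ((i : Int) + 2))) pvHexdigits ∧
            PySem.Chars.isIn (PySem.List.slice cs (some ((i : Int) + 2)) (some ((i : Int) + 3))) pvHexdigits
        · rw [if_pos hc, ih (i + 3) _ (by omega)]
          obtain ⟨hpc, hlen, hx1, hx2⟩ := hc
          have hpc' : cs[i] = '%' := by rw [hget] at hpc; exact Option.some.inj hpc
          have h1 : i + 1 < cs.length := by omega
          have h2 : i + 2 < cs.length := by omega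
          have hd1 : cs.drop (i + 1) = cs[i + 1] :: cs.drop (i + 2) := List.drop_eq_getElem_cons h1
          have hd2 : cs.drop (i + 2) = cs[i + 2] :: cs.drop (i + 3) := List.drop_eq_getElem_cons h2
          rw [hs1, hd1] at hx1
          rw [hs2, hd2] at hx2
          simp only [List.take_succ_cons, List.take_zero, isIn_singleton_hex,
            decide_eq_true_eq] at hx1 hx2
          rw [hdrop, hpc', hd1, hd2, pvTokens_percent, if_pos ⟨hx1, hx2⟩]
          rw [hs13, hd1, hd2]
          simp only [List.take_succ_cons, List.take_zero, List.map_cons, List.flatten_cons,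
            pvRepl, List.length_cons, List.length_nil]
          simp only [List.append_assoc]
          rfl
        · rw [if_neg hc, ih (i + 1) _ (by omega)]
          have htok : pvTokens (cs.drop i) = [cs[i]] :: pvTokens (cs.drop (i + 1)) := by
            by_cases hpc : cs[i] = '%'
            · by_cases hlen : i < cs.length - 2
              · -- three chars available but one of them is not a hex digit
                have h1 : i + 1 < cs.length := by omega
                have h2 : i + 2 < cs.length := by omega
                have hd1 : cs.drop (i + 1) = cs[i + 1] :: cs.drop (i + 2) := List.drop_eq_getElem_cons h1
                have hd2 : cs.drop (i + 2) = cs[i + 2] :: cs.drop (i + 3) := List.drop_eq_getElem_cons h2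
                have hnh : ¬ (cs[i + 1] ∈ pvHexdigits ∧ cs[i + 2] ∈ pvHexdigits) := by
                  rintro ⟨ha, hb⟩
                  refine hc ⟨by rw [hget, hpc], hlen, ?_, ?_⟩
                  · rw [hs1, hd1]
                    simp only [List.take_succ_cons, List.take_zero, isIn_singleton_hex,
                      decide_eq_true_eq]
                    exact ha
                  · rw [hs2, hd2]
                    simp only [List.take_succ_cons, List.take_zero, isIn_singleton_hex,
                      decide_eq_true_eq]
                    exact hb
                rw [hdrop, hpc]
                conv_lhs => rw [hd1, hd2]
                rw [pvTokens_percent, if_neg hnh, ← hd2, ← hd1]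
              · -- fewer than three characters remain
                have hshort : (cs.drop (i + 1)).length ≤ 1 := by
                  rw [List.length_drop]; omega
                rw [hdrop, hpc, pvTokens_percent_short _ hshort]
            · rw [hdrop, pvTokens_cons_ne _ _ hpc]
          rw [htok, hgetD]
          simp only [List.map_cons, List.flatten_cons, pvRepl, List.length_cons,
            List.length_nil, List.append_assoc]
          norm_num
      · rw [tamperLoop, dif_neg h, List.drop_eq_nil_of_le (by omega)]
        simp [pvTokens]

-- ===== VERDICT (by name: the statement is the Claim_ definition above) =====
theorem tamper_spec : Claim_equal_tamper := by
  intro payload _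
  unfold Spec_tamper tamper tamper_alt
  by_cases h : payload = "" <;> simp only [h, if_pos, reduceIte]
  rw [tamperLoop_eq payload.toList payload.toList.length 0 [] (by omega)]
  simp
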